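-- pv_equiv track=rewrite | github.com/lorebianchi98/FG-OVD | NoctOWL/eval/fg-ovd/evaluate_map.py | transform_predslist_to_dict
-- ===== SOURCE A (Python) =====
-- def transform_predslist_to_dict(preds):
--     result = {}
--     for pred in preds:
--         image = pred['image_filepath']
--         if image not in result:
--             result[image] = []
--         result[image].append(pred)
--     return result
-- ===== SOURCE B (Python) =====
-- def transform_predslist_to_dict(preds):
--     keys = dict.fromkeys(pred['image_filepath'] for pred in preds)
--     return {k: [pred for pred in preds if pred['image_filepath'] == k] for k in keys}
-- ===== Notes on version B (the rewrite author's own statement) =====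
-- stated objective: alternative
-- what changed: B replaces A's single scan that grows per-key buckets in a dict with a two-phase plan: first an ordered dedup of the image keys (dict.fromkeys), then one filtering pass over preds per key.
import Mathlib
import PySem

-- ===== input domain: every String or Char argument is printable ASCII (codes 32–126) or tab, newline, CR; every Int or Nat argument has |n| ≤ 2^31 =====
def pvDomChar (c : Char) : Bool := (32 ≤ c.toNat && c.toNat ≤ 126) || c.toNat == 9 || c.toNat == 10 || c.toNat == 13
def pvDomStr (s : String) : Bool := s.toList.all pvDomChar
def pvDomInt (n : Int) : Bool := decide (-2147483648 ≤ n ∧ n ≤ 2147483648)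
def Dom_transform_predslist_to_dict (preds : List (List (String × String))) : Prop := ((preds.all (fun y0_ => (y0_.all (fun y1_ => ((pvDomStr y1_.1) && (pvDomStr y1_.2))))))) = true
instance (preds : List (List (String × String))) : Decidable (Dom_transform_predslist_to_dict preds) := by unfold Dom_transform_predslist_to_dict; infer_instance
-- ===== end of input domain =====

-- B groups predictions by 'image_filepath' in two phases (ordered key dedup, then one filter pass per key)
-- instead of A's single scan growing per-key buckets; same return value on all inputs where A returns.


-- shared helper: pred['image_filepath'] (first match, per the assoc-list convention; total via getD "",
-- Pre_ guarantees the key is present so the default is never the value Python raises on)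
def pvKey (pred : List (String × String)) : String :=
  ((PySem.Dict.mk pred).get? "image_filepath").getD ""

-- ===== PORT A =====
def transform_predslist_to_dict (preds : List (List (String × String))) : List (String × List (List (String × String))) :=
  (preds.foldl
    (fun result pred =>
      let image := pvKey pred
      let result := if result.contains image then result
                    else result.insert image ([] : List (List (String × String)))
      result.modify image [] (fun l => l ++ [pred]))
    PySem.Dict.empty).items

-- ===== PORT B =====
def transform_predslist_to_dict_alt (preds : List (List (String × String))) : List (String × List (List (String × String))) :=
  let keys := PySem.List.dedup (preds.map pvKey)
  keys.map (fun k => (k, preds.filter (fun pred => pvKey pred == k)))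

-- ===== PRECONDITION & SPEC =====
-- Pre_: every prediction carries the 'image_filepath' key; on any other pred Python A raises KeyError.
def Pre_transform_predslist_to_dict (preds : List (List (String × String))) : Prop :=
  (preds.all (fun pred => (PySem.Dict.mk pred).contains "image_filepath")) = true
instance (preds : List (List (String × String))) : Decidable (Pre_transform_predslist_to_dict preds) := by unfold Pre_transform_predslist_to_dict; infer_instance

def pvWitness_transform_predslist_to_dict : (List (List (String × String))) :=
  [[("image_filepath", "a.jpg"), ("score", "1")],
   [("image_filepath", "b.jpg")],
   [("image_filepath", "a.jpg"), ("score", "2")]]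

def Spec_transform_predslist_to_dict (preds : List (List (String × String))) (out : List (String × List (List (String × String)))) : Prop := out = transform_predslist_to_dict_alt preds
instance (preds : List (List (String × String))) (out : List (String × List (List (String × String)))) : Decidable (Spec_transform_predslist_to_dict preds out) := by unfold Spec_transform_predslist_to_dict; infer_instance

-- ===== CLAIM (what is proved, stated in full; the proofs are below) =====
def Claim_equal_transform_predslist_to_dict : Prop := ∀ (preds : List (List (String × String))), Dom_transform_predslist_to_dict preds → Pre_transform_predslist_to_dict preds → Spec_transform_predslist_to_dict preds (transform_predslist_to_dict preds)

-- ===== LEMMAS AND PROOFS =====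

-- A's loop body ('if image not in result: result[image] = []' then append) is one dict modify.
theorem pv_step_eq (d : PySem.Dict String (List (List (String × String)))) (pred : List (String × String)) :
    (let image := pvKey pred
     let result := if d.contains image then d
                   else d.insert image ([] : List (List (String × String)))
     result.modify image [] (fun l => l ++ [pred]))
      = d.modify (pvKey pred) [] (fun l => l ++ [pred]) := by
  by_cases h : d.contains (pvKey pred)
  · simp [h]
  · simp only [h, Bool.false_eq_true, if_false]
    simp [PySem.Dict.modify, PySem.Dict.insert_insert_self, PySem.Dict.getD_insert_self,
      PySem.Dict.getD_of_not_contains d ([] : List (List (String × String))) (Bool.eq_false_iff.mpr h)]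

theorem pv_upd_nil (l : List String) :
    PySem.Set.update ([] : List String) l = PySem.Set.ofList l := by
  simp [PySem.Set.update, PySem.Set.ofList]

theorem pv_main (preds : List (List (String × String))) :
    transform_predslist_to_dict preds = transform_predslist_to_dict_alt preds := by
  unfold transform_predslist_to_dict transform_predslist_to_dict_alt
  have h1 := PySem.List.foldl_congr_mem (l := preds)
      (init := (PySem.Dict.empty : PySem.Dict String (List (List (String × String)))))
      (f := fun result pred =>
        let image := pvKey pred
        let result := if result.contains image then result
                      else result.insert image ([] : List (List (String × String)))
        result.modify image [] (fun l => l ++ [pred]))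
      (g := fun d pred => d.modify (pvKey pred) [] (fun l => l ++ [pred]))
      (by intro acc x _; exact pv_step_eq acc x)
  rw [h1]
  have hmap : preds.foldl (fun d pred => d.modify (pvKey pred) [] (fun l => l ++ [pred]))
        (PySem.Dict.empty : PySem.Dict String (List (List (String × String))))
      = (preds.map (fun p => (pvKey p, p))).foldl
          (fun d q => d.modify q.1 [] (fun l => l ++ [q.2])) PySem.Dict.empty := by
    rw [List.foldl_map]
  rw [hmap]
  set l := preds.map (fun p => (pvKey p, p)) with hl
  have hnd : ((l.foldl (fun d q => d.modify q.1 [] (fun v => v ++ [q.2]))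
      (PySem.Dict.empty : PySem.Dict String (List (List (String × String))))).keys).Nodup := by
    exact PySem.Dict.nodup_keys_foldl_modify_key l (fun q => q.1) [] (fun _ q v => v ++ [q.2])
      PySem.Dict.empty (by simp [pysem])
  rw [PySem.Dict.items_eq_map_keys _ hnd ([] : List (List (String × String)))]
  have hkeys : (l.foldl (fun d q => d.modify q.1 [] (fun v => v ++ [q.2]))
      (PySem.Dict.empty : PySem.Dict String (List (List (String × String))))).keys
      = PySem.List.dedup (preds.map pvKey) := by
    rw [PySem.Dict.keys_foldl_modify_key l (fun q => q.1) [] (fun _ q v => v ++ [q.2])]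
    simp only [PySem.Dict.keys_empty, pv_upd_nil, PySem.List.dedup_eq_ofList, hl]
    congr 1
    simp
  rw [hkeys]
  apply List.map_congr_left
  intro k _
  congr 1
  rw [PySem.Dict.getD_foldl_modify_append l PySem.Dict.empty k]
  simp [hl, List.filter_map, Function.comp_def]

-- ===== VERDICT (by name: the statement is the Claim_ definition above) =====
theorem transform_predslist_to_dict_spec : Claim_equal_transform_predslist_to_dict := by
  intro preds _ _
  unfold Spec_transform_predslist_to_dict
  exact pv_main preds
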